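-- pv_equiv track=rewrite | github.com/sudo-000/Shatter-Improved | addon/shatter/bake_mesh.py | parseIntTriplet
-- ===== SOURCE A (Python) =====
-- def removeEverythingEqualTo(array, value):
-- 	"""
-- 	Remove everything in an array equal to a value
-- 	"""
--
-- 	while (True):
-- 		try:
-- 			array.remove(value)
-- 		except ValueError:
-- 			return array
--
-- def parseIntTriplet(string):
-- 	"""
-- 	Parse either a single int or three ints in a string to a tuple of three ints
-- 	"""
--
-- 	array = removeEverythingEqualTo(string.split(" "), "")
-- 	array = [int(array[i]) for i in range(len(array))]
--
-- 	if (len(array) < 3):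
-- 		c = len(array) - 1
--
-- 		for _ in range(c, 3):
-- 			array.append(array[c])
--
-- 	return (array[0], array[1], array[2])
-- ===== SOURCE B (Python) =====
-- def parseIntTriplet(string):
--     nums = [int(x) for x in string.split(" ") if x != ""]
--     return tuple(nums[min(i, len(nums) - 1)] for i in range(3))
-- ===== Notes on version B (the rewrite author's own statement) =====
-- stated objective: simpler
-- what changed: Replaces the repeated list.remove('') loop and the append-the-last-element padding loop with a single filtered comprehension and clamped indexing nums[min(i, len(nums)-1)] for the three result slots.
import Mathlib
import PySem

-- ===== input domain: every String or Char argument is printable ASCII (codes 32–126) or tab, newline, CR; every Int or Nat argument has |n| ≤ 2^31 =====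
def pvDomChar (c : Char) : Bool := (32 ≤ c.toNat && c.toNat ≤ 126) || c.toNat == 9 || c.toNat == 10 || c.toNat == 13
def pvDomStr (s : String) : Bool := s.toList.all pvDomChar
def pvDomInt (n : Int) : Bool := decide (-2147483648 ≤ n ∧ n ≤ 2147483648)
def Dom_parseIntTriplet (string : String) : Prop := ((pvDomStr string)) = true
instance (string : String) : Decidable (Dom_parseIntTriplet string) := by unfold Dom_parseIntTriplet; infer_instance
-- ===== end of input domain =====

-- B replaces A's repeated list.remove("") loop and append-last padding loop with one
-- filtered comprehension and clamped indexing (objective: simpler).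

-- ===== PORT A =====
-- while True: try array.remove(value) except ValueError: return array
def removeEverythingEqualTo (array : List String) (value : String) : List String :=
  match h : PySem.List.remove? array value with
  | none => array
  | some ys => removeEverythingEqualTo ys value
termination_by array.length
decreasing_by
  have hv : value ∈ array := by
    by_contra hn
    rw [(PySem.List.remove?_eq_none_iff array value).mpr hn] at h
    simp at h
  rw [PySem.List.remove?_eq_some_erase array value hv] at h
  cases h
  rw [List.length_erase_of_mem hv]
  have := List.length_pos_of_mem hv
  omega

def parseIntTriplet (string : String) : Int × Int × Int :=
  let array := removeEverythingEqualTo ((PySem.Str.split? string " ").getD []) ""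
  -- [int(array[i]) for i in range(len(array))]; int() failure (ValueError) is excluded by Pre_
  let array := (PySem.List.pyRange 0 array.length 1).map
      (fun i => (PySem.Int.ofStr? (PySem.List.pyGetD array i "")).getD 0)
  let array := if array.length < 3 then
      let c : Int := (array.length : Int) - 1
      (PySem.List.pyRange c 3 1).foldl
        (fun acc _ => acc ++ [(PySem.List.pyGet? acc c).getD 0]) array
    else array
  (((PySem.List.pyGet? array 0).getD 0), ((PySem.List.pyGet? array 1).getD 0),
    ((PySem.List.pyGet? array 2).getD 0))

-- ===== PORT B =====
def parseIntTriplet_alt (string : String) : Int × Int × Int :=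
  let nums := (((PySem.Str.split? string " ").getD []).filter (fun x => x ≠ "")).map
      (fun x => (PySem.Int.ofStr? x).getD 0)
  let n : Int := (nums.length : Int)
  (((PySem.List.pyGet? nums (min 0 (n - 1))).getD 0),
   ((PySem.List.pyGet? nums (min 1 (n - 1))).getD 0),
   ((PySem.List.pyGet? nums (min 2 (n - 1))).getD 0))

-- ===== PRECONDITION & SPEC =====
-- Pre_ excludes exactly the inputs where Python A raises: no token at all (IndexError via
-- array[-1]) or a token int() rejects (ValueError).
def Pre_parseIntTriplet (string : String) : Prop :=
  let toks := ((PySem.Str.split? string " ").getD []).filter (fun x => x ≠ "")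
  toks ≠ [] ∧ ∀ t ∈ toks, (PySem.Int.ofStr? t).isSome
instance (string : String) : Decidable (Pre_parseIntTriplet string) := by
  unfold Pre_parseIntTriplet; infer_instance
def pvWitness_parseIntTriplet : String := "1 2 3"

def Spec_parseIntTriplet (string : String) (out : Int × Int × Int) : Prop := out = parseIntTriplet_alt string
instance (string : String) (out : Int × Int × Int) : Decidable (Spec_parseIntTriplet string out) := by unfold Spec_parseIntTriplet; infer_instance

-- ===== CLAIM (what is proved, stated in full; the proofs are below) =====
def Claim_equal_parseIntTriplet : Prop := ∀ (string : String), Dom_parseIntTriplet string → Pre_parseIntTriplet string → Spec_parseIntTriplet string (parseIntTriplet string)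

-- ===== LEMMAS AND PROOFS =====

theorem map_comprehension (xs : List String) :
    (PySem.List.pyRange 0 (xs.length : Int) 1).map
        (fun i => (PySem.Int.ofStr? (PySem.List.pyGetD xs i "")).getD 0)
      = xs.map (fun x => (PySem.Int.ofStr? x).getD 0) :=
  PySem.List.map_pyRange_zero_pyGetD' xs "" (fun x => (PySem.Int.ofStr? x).getD 0)

-- erasing one copy of v does not change the v-free filter
theorem filter_ne_erase (xs : List String) (v : String) :
    (xs.erase v).filter (fun x => x ≠ v) = xs.filter (fun x => x ≠ v) := by
  induction xs with
  | nil => simp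
  | cons x xs ih =>
    by_cases hx : x = v
    · subst hx; simp [List.erase_cons_head]
    · rw [List.erase_cons_tail (by simpa using hx)]
      simp only [List.filter_cons]
      rw [ih]

-- A's remove-loop computes the filter
theorem removeEverythingEqualTo_eq_filter (array : List String) (value : String) :
    removeEverythingEqualTo array value = array.filter (fun x => x ≠ value) := by
  induction array using removeEverythingEqualTo.induct value with
  | case1 xs h =>
    rw [removeEverythingEqualTo]
    split
    · rw [List.filter_eq_self.mpr]
      intro a ha
      have hv : value ∉ xs := (PySem.List.remove?_eq_none_iff xs value).mp h
      simp only [ne_eq, decide_eq_true_eq]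
      intro hav; exact hv (hav ▸ ha)
    · next ys heq => rw [h] at heq; simp at heq
  | case2 xs ys h ih =>
    have hv : value ∈ xs := by
      by_contra hn
      rw [(PySem.List.remove?_eq_none_iff xs value).mpr hn] at h
      simp at h
    have herase : ys = xs.erase value := by
      rw [PySem.List.remove?_eq_some_erase xs value hv] at h
      exact (Option.some_inj.mp h).symm
    rw [removeEverythingEqualTo]
    split
    · next heq => rw [h] at heq; simp at heq
    · next ys' heq =>
      rw [h] at heq
      cases Option.some_inj.mp heq
      rw [ih, herase]
      exact filter_ne_erase xs value

theorem parseIntTriplet_spec' (string : String) (hpre : Pre_parseIntTriplet string) :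
    parseIntTriplet string = parseIntTriplet_alt string := by
  obtain ⟨hne, _⟩ := hpre
  simp only [parseIntTriplet, parseIntTriplet_alt, removeEverythingEqualTo_eq_filter]
  set toks := ((PySem.Str.split? string " ").getD []).filter (fun x => x ≠ "") with htoks
  clear_value toks
  match toks, hne with
  | [a], _ =>
      simp [PySem.List.pyRange, PySem.List.pyGet?, PySem.List.pyIdx?, PySem.List.pyGetD, List.range_succ]
  | [a, b], _ =>
      simp [PySem.List.pyRange, PySem.List.pyGet?, PySem.List.pyIdx?, PySem.List.pyGetD, List.range_succ]
  | a :: b :: c :: rest, _ =>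
    rw [map_comprehension]
    simp only [List.map_cons, List.length_cons, List.length_map]
    have h3 : ¬ (rest.length + 1 + 1 + 1 < 3) := by omega
    simp only [if_neg h3]
    have hn : (2:Int) ≤ ((rest.length + 1 + 1 + 1 : Nat) : Int) - 1 := by
      push_cast; omega
    rw [min_eq_left (le_trans (by norm_num) hn), min_eq_left (le_trans (by norm_num) hn),
        min_eq_left hn]

-- ===== VERDICT (by name: the statement is the Claim_ definition above) =====
theorem parseIntTriplet_spec : Claim_equal_parseIntTriplet := by
  intro s _ hpre
  exact parseIntTriplet_spec' s hpre
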